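-- pv_equiv track=rewrite | github.com/eliottcassidy2000/math | 04-computation/h21_alpha3_check_n9.py | max_independent_set_3cycles
-- ===== SOURCE A (Python) =====
-- def max_independent_set_3cycles(cycle_sets):
--     """Find max pairwise-disjoint set among 3-cycle vertex sets."""
--     n = len(cycle_sets)
--     if n == 0:
--         return 0
--     best = 1
--     # Try size 3 first
--     for a in range(n):
--         for b in range(a+1, n):
--             if cycle_sets[a] & cycle_sets[b]:
--                 continue
--             for c in range(b+1, n):
--                 if cycle_sets[c] & cycle_sets[a] or cycle_sets[c] & cycle_sets[b]:
--                     continue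
--                 return 3  # Found 3 pairwise-disjoint
--             best = max(best, 2)
--     return best
-- ===== SOURCE B (Python) =====
-- def max_independent_set_3cycles(cycle_sets):
--     """Find max pairwise-disjoint set among 3-cycle vertex sets.
--
--     Different strategy: view the inputs as vertices of a 'disjointness graph'
--     (an edge joins two disjoint sets) whose rows are computed on demand and
--     memoized, so each pair of input sets is intersected at most once; the
--     answer is 3 iff that graph has a triangle (found by intersecting two
--     adjacency rows), else 2 iff it has an edge, else 1.
--     """
--     n = len(cycle_sets)
--     if n == 0:
--         return 0
--     rows = {}
--
--     def row(i):
--         r = rows.get(i)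
--         if r is None:
--             s = cycle_sets[i]
--             r = {j for j in range(n) if j != i and not (s & cycle_sets[j])}
--             rows[i] = r
--         return r
--
--     any_edge = False
--     for i in range(n):
--         ri = row(i)
--         if ri:
--             any_edge = True
--         for j in ri:
--             if j > i and ri & row(j):
--                 return 3
--     return 2 if any_edge else 1
-- ===== Notes on version B (the rewrite author's own statement) =====
-- stated objective: alternative
-- what changed: B views the inputs as a disjointness graph whose adjacency rows are computed on demand and memoized (each pair of input sets intersected at most once), answering 3 via triangle detection by intersecting two rows, 2 via edge existence, instead of A's nested loops that re-intersect the input sets inside the innermost scan.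
import Mathlib
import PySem

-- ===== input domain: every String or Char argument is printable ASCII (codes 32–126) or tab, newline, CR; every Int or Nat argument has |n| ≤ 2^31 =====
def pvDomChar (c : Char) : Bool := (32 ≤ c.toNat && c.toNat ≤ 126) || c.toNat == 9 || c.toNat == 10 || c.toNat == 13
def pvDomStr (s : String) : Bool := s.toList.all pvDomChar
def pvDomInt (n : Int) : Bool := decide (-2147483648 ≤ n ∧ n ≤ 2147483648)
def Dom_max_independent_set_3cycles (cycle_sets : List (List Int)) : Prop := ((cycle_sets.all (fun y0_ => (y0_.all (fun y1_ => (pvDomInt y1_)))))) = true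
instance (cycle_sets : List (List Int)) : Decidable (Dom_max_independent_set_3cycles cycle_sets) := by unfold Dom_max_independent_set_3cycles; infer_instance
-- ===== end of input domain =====

-- B replaces A's re-intersection of the input sets inside the innermost loop by a disjointness
-- graph whose rows are computed at most once each, the triple being a triangle of that graph
-- (objective: alternative).

-- ===== PORT A =====
-- truthiness of `s & t` for Python sets: the intersection is nonempty
def pvInterNE (s t : List Int) : Bool := !(PySem.Set.inter s t).isEmpty

def pvGetS (L : List (List Int)) (i : Nat) : List Int := L.getD i []

-- `for c in range(b+1, n): if ... continue; return 3` — true iff the return fires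
def pvLoopC (L : List (List Int)) (a b : Nat) (cs : List Nat) : Bool :=
  match cs with
  | [] => false
  | c :: rest =>
    if pvInterNE (pvGetS L c) (pvGetS L a) || pvInterNE (pvGetS L c) (pvGetS L b) then
      pvLoopC L a b rest
    else true

-- inner `for b` loop: (return-3 fired?, best)
def pvLoopB (L : List (List Int)) (a : Nat) (bs : List Nat) (best : Int) : Bool × Int :=
  match bs with
  | [] => (false, best)
  | b :: rest =>
    if pvInterNE (pvGetS L a) (pvGetS L b) then pvLoopB L a rest best
    else if pvLoopC L a b (List.range' (b+1) (L.length - (b+1))) then (true, best)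
    else pvLoopB L a rest (max best 2)

def pvLoopA (L : List (List Int)) (as_ : List Nat) (best : Int) : Int :=
  match as_ with
  | [] => best
  | a :: rest =>
    match pvLoopB L a (List.range' (a+1) (L.length - (a+1))) best with
    | (true, _) => 3
    | (false, best') => pvLoopA L rest best'

def max_independent_set_3cycles (cycle_sets : List (List Int)) : Int :=
  if cycle_sets.length = 0 then 0
  else pvLoopA cycle_sets (List.range cycle_sets.length) 1

-- ===== PORT B =====
-- row(i) = {j for j in range(n) if j != i and not (cycle_sets[i] & cycle_sets[j])}
-- (a set of distinct Nats; the filtered range is Nodup, so it satisfies the Set invariant).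
-- Source B memoizes row(i) in a dict; the cache only caches this pure computation, so the
-- port computes row(i) directly — value-identical.
def pvAdjOf (L : List (List Int)) (i : Nat) : List Nat :=
  (List.range L.length).filter (fun j => decide (j ≠ i) && !(pvInterNE (pvGetS L i) (pvGetS L j)))

-- `for i in range(n): ... for j in ri: if j > i and ri & row(j): return 3` with the
-- any_edge accumulator; `ri & row(j)` truthiness = nonempty intersection, and `return 3`
-- does not depend on which j is found first, so the set iteration is ported as `any`.
def pvScanB (L : List (List Int)) (is_ : List Nat) (anyEdge : Bool) : Int :=
  match is_ with
  | [] => if anyEdge then 2 else 1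
  | i :: rest =>
    if (pvAdjOf L i).any (fun j =>
        decide (i < j) && !(PySem.Set.inter (pvAdjOf L i) (pvAdjOf L j)).isEmpty) then 3
    else pvScanB L rest (anyEdge || !(pvAdjOf L i).isEmpty)

def max_independent_set_3cycles_alt (cycle_sets : List (List Int)) : Int :=
  if cycle_sets.length = 0 then 0
  else pvScanB cycle_sets (List.range cycle_sets.length) false

-- ===== PRECONDITION & SPEC =====
def Spec_max_independent_set_3cycles (cycle_sets : List (List Int)) (out : Int) : Prop := out = max_independent_set_3cycles_alt cycle_sets
instance (cycle_sets : List (List Int)) (out : Int) : Decidable (Spec_max_independent_set_3cycles cycle_sets out) := by unfold Spec_max_independent_set_3cycles; infer_instance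

-- ===== CLAIM (what is proved, stated in full; the proofs are below) =====
def Claim_equal_max_independent_set_3cycles : Prop := ∀ (cycle_sets : List (List Int)), Dom_max_independent_set_3cycles cycle_sets → Spec_max_independent_set_3cycles cycle_sets (max_independent_set_3cycles cycle_sets)

-- ===== LEMMAS AND PROOFS =====

-- `i` and `j` hold disjoint sets
def pvDis (L : List (List Int)) (i j : Nat) : Prop := pvInterNE (pvGetS L i) (pvGetS L j) = false

theorem pvInterNE_true_iff (s t : List Int) :
    pvInterNE s t = true ↔ ∃ x, x ∈ s ∧ x ∈ t := by
  unfold pvInterNE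
  rw [Bool.not_eq_true']
  constructor
  · intro h
    rcases hl : PySem.Set.inter s t with _ | ⟨y, ys⟩
    · rw [hl] at h; simp at h
    · have hy : y ∈ PySem.Set.inter s t := by simp [hl]
      exact ⟨y, by simpa [PySem.Set.mem_inter] using hy⟩
  · rintro ⟨x, hs, ht⟩
    have hx : x ∈ PySem.Set.inter s t := by
      rw [PySem.Set.mem_inter]; exact ⟨hs, ht⟩
    rcases hl : PySem.Set.inter s t with _ | ⟨y, ys⟩
    · rw [hl] at hx; simp at hx
    · simp

theorem pvInterNE_false_iff (s t : List Int) :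
    pvInterNE s t = false ↔ ∀ x ∈ s, x ∉ t := by
  constructor
  · intro h x hx hxt
    have : pvInterNE s t = true := (pvInterNE_true_iff s t).mpr ⟨x, hx, hxt⟩
    rw [h] at this; cases this
  · intro h
    cases hb : pvInterNE s t
    · rfl
    · obtain ⟨x, hs, ht⟩ := (pvInterNE_true_iff s t).mp hb
      exact absurd ht (h x hs)

theorem pvDis_symm {L : List (List Int)} {i j : Nat} (h : pvDis L i j) : pvDis L j i := by
  unfold pvDis at h ⊢
  rw [pvInterNE_false_iff] at h ⊢
  intro x hx hxt
  exact h x hxt hx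

theorem pvLoopC_iff (L : List (List Int)) (a b : Nat) (cs : List Nat) :
    pvLoopC L a b cs = true ↔
      ∃ c ∈ cs, pvInterNE (pvGetS L c) (pvGetS L a) = false ∧
        pvInterNE (pvGetS L c) (pvGetS L b) = false := by
  induction cs with
  | nil => simp [pvLoopC]
  | cons c rest ih =>
    simp only [pvLoopC]
    split_ifs with h
    · rw [ih]
      have hc : ¬(pvInterNE (pvGetS L c) (pvGetS L a) = false ∧
          pvInterNE (pvGetS L c) (pvGetS L b) = false) := by
        rintro ⟨h1, h2⟩; rw [h1, h2] at h; cases h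
      constructor
      · rintro ⟨x, hx, px⟩; exact ⟨x, List.mem_cons_of_mem _ hx, px⟩
      · rintro ⟨x, hx, px⟩
        rcases List.mem_cons.mp hx with rfl | hx'
        · exact absurd px hc
        · exact ⟨x, hx', px⟩
    · constructor
      · intro _
        have h' := Bool.or_eq_false_iff.mp (Bool.eq_false_iff.mpr h)
        exact ⟨c, by simp, h'.1, h'.2⟩
      · intro _; rfl

-- the condition under which b makes the inner loop return 3
def pvFB (L : List (List Int)) (a b : Nat) : Bool :=
  !(pvInterNE (pvGetS L a) (pvGetS L b)) &&
    pvLoopC L a b (List.range' (b+1) (L.length - (b+1)))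

theorem pvLoopB_fst (L : List (List Int)) (a : Nat) (bs : List Nat) (best : Int) :
    (pvLoopB L a bs best).1 = bs.any (pvFB L a) := by
  induction bs generalizing best with
  | nil => simp [pvLoopB]
  | cons b rest ih =>
    simp only [pvLoopB, List.any_cons]
    split_ifs with h1 h2
    · simp [pvFB, h1, ih]
    · simp [pvFB, h1, h2]
    · simp [pvFB, h1, h2, ih]

theorem pvLoopB_snd (L : List (List Int)) (a : Nat) (bs : List Nat) (best : Int)
    (h : bs.any (pvFB L a) = false) :
    (pvLoopB L a bs best).2 =
      if bs.any (fun b => !(pvInterNE (pvGetS L a) (pvGetS L b))) then max best 2 else best := by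
  induction bs generalizing best with
  | nil => simp [pvLoopB]
  | cons b rest ih =>
    rw [List.any_cons, Bool.or_eq_false_iff] at h
    obtain ⟨hb, hrest⟩ := h
    simp only [pvLoopB]
    cases h1 : pvInterNE (pvGetS L a) (pvGetS L b) with
    | true =>
      rw [if_pos rfl, ih _ hrest, List.any_cons, h1]
      simp only [Bool.not_true, Bool.false_or]
    | false =>
      rw [if_neg (by simp)]
      have hC : pvLoopC L a b (List.range' (b+1) (L.length - (b+1))) = false := by
        simpa [pvFB, h1] using hb
      rw [if_neg (by simp [hC]), ih _ hrest, List.any_cons, h1, max_assoc, max_self]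
      simp

def pvGA (L : List (List Int)) (a : Nat) : Bool :=
  (List.range' (a+1) (L.length - (a+1))).any (pvFB L a)

def pvPA (L : List (List Int)) (a : Nat) : Bool :=
  (List.range' (a+1) (L.length - (a+1))).any (fun b => !(pvInterNE (pvGetS L a) (pvGetS L b)))

theorem pvLoopA_eq (L : List (List Int)) (as_ : List Nat) (best : Int) :
    pvLoopA L as_ best =
      if as_.any (pvGA L) then 3
      else if as_.any (pvPA L) then max best 2 else best := by
  induction as_ generalizing best with
  | nil => simp [pvLoopA]
  | cons a rest ih =>
    rcases hLB : pvLoopB L a (List.range' (a+1) (L.length - (a+1))) best with ⟨f, b'⟩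
    have hfst : f = pvGA L a := by
      have h := pvLoopB_fst L a (List.range' (a+1) (L.length - (a+1))) best
      rw [hLB] at h; exact h
    simp only [pvLoopA, hLB, List.any_cons]
    cases hga : pvGA L a
    · rw [hga] at hfst; subst hfst
      have hb' : b' = if pvPA L a then max best 2 else best := by
        have h := pvLoopB_snd L a (List.range' (a+1) (L.length - (a+1))) best
          (by simpa [pvGA] using hga)
        rw [hLB] at h; exact h
      show pvLoopA L rest b' = _
      rw [ih, hb']
      by_cases hpa : pvPA L a = true <;>
        by_cases hra : rest.any (pvPA L) = true <;>
        by_cases hrg : rest.any (pvGA L) = true <;>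
        simp [hpa, hra, hrg]
    · rw [hga] at hfst; subst hfst
      show (3 : Int) = _
      simp

-- semantic characterisations
theorem pvAnyTri_iff (L : List (List Int)) :
    (List.range L.length).any (pvGA L) = true ↔
      ∃ i j k, i < j ∧ j < k ∧ k < L.length ∧ pvDis L i j ∧ pvDis L i k ∧ pvDis L j k := by
  constructor
  · intro h
    rw [List.any_eq_true] at h
    obtain ⟨a, ha, hGA⟩ := h
    rw [List.mem_range] at ha
    unfold pvGA at hGA
    rw [List.any_eq_true] at hGA
    obtain ⟨b, hbmem, hFB⟩ := hGA
    rw [List.mem_range'_1] at hbmem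
    unfold pvFB at hFB
    rw [Bool.and_eq_true] at hFB
    obtain ⟨hab, hC⟩ := hFB
    rw [Bool.not_eq_true'] at hab
    rw [pvLoopC_iff] at hC
    obtain ⟨c, hcmem, hca, hcb⟩ := hC
    rw [List.mem_range'_1] at hcmem
    exact ⟨a, b, c, by omega, by omega, by omega, hab,
      pvDis_symm hca, pvDis_symm hcb⟩
  · rintro ⟨i, j, k, hij, hjk, hk, dij, dik, djk⟩
    rw [List.any_eq_true]
    refine ⟨i, by rw [List.mem_range]; omega, ?_⟩
    unfold pvGA
    rw [List.any_eq_true]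
    refine ⟨j, by rw [List.mem_range'_1]; omega, ?_⟩
    unfold pvFB
    rw [Bool.and_eq_true, Bool.not_eq_true']
    refine ⟨dij, ?_⟩
    rw [pvLoopC_iff]
    exact ⟨k, by rw [List.mem_range'_1]; omega, pvDis_symm dik, pvDis_symm djk⟩

theorem pvAnyPair_iff (L : List (List Int)) :
    (List.range L.length).any (pvPA L) = true ↔
      ∃ i j, i < j ∧ j < L.length ∧ pvDis L i j := by
  constructor
  · intro h
    rw [List.any_eq_true] at h
    obtain ⟨a, ha, hPA⟩ := h
    rw [List.mem_range] at ha
    unfold pvPA at hPA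
    rw [List.any_eq_true] at hPA
    obtain ⟨b, hbmem, hb⟩ := hPA
    rw [List.mem_range'_1] at hbmem
    rw [Bool.not_eq_true'] at hb
    exact ⟨a, b, by omega, by omega, hb⟩
  · rintro ⟨i, j, hij, hj, dij⟩
    rw [List.any_eq_true]
    refine ⟨i, by rw [List.mem_range]; omega, ?_⟩
    unfold pvPA
    rw [List.any_eq_true]
    exact ⟨j, by rw [List.mem_range'_1]; omega, by rw [Bool.not_eq_true']; exact dij⟩

theorem pvMemAdjOf (L : List (List Int)) (i j : Nat) :
    j ∈ pvAdjOf L i ↔ j < L.length ∧ j ≠ i ∧ pvDis L i j := by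
  simp [pvAdjOf, List.mem_filter, List.mem_range, pvDis]

-- the triangle test made at index i by pvScanB
def pvTRI (L : List (List Int)) (i : Nat) : Bool :=
  (pvAdjOf L i).any (fun j =>
    decide (i < j) && !(PySem.Set.inter (pvAdjOf L i) (pvAdjOf L j)).isEmpty)

def pvEDGE (L : List (List Int)) (i : Nat) : Bool := !(pvAdjOf L i).isEmpty

theorem pvScanB_eq (L : List (List Int)) (is_ : List Nat) (ae : Bool) :
    pvScanB L is_ ae =
      if is_.any (pvTRI L) then 3
      else if (ae || is_.any (pvEDGE L)) then 2 else 1 := by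
  induction is_ generalizing ae with
  | nil => simp [pvScanB]
  | cons i rest ih =>
    show (if pvTRI L i = true then (3 : Int)
        else pvScanB L rest (ae || pvEDGE L i)) = _
    rw [List.any_cons, List.any_cons]
    cases ht : pvTRI L i
    · rw [if_neg (by simp), ih]
      simp [Bool.or_assoc]
    · rw [if_pos rfl]
      simp

theorem pvAnyTRI_iff (L : List (List Int)) :
    (List.range L.length).any (pvTRI L) = true ↔
      ∃ i j k, i < j ∧ j < k ∧ k < L.length ∧ pvDis L i j ∧ pvDis L i k ∧ pvDis L j k := by
  constructor
  · intro h
    rw [List.any_eq_true] at h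
    obtain ⟨i, hi, h⟩ := h
    rw [List.mem_range] at hi
    unfold pvTRI at h
    rw [List.any_eq_true] at h
    obtain ⟨j, hj, h⟩ := h
    obtain ⟨hjn, hji, dij⟩ := (pvMemAdjOf L i j).mp hj
    rw [Bool.and_eq_true] at h
    obtain ⟨hij, hint⟩ := h
    rw [decide_eq_true_iff] at hij
    rw [Bool.not_eq_true'] at hint
    have hex : ∃ k, k ∈ PySem.Set.inter (pvAdjOf L i) (pvAdjOf L j) := by
      rcases hl : PySem.Set.inter (pvAdjOf L i) (pvAdjOf L j) with _ | ⟨y, ys⟩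
      · rw [hl] at hint; cases hint
      · exact ⟨y, by simp⟩
    obtain ⟨k, hk⟩ := hex
    rw [PySem.Set.mem_inter] at hk
    obtain ⟨hki, hkj⟩ := hk
    obtain ⟨hkn, hknei, dik⟩ := (pvMemAdjOf L i k).mp hki
    obtain ⟨_, hknej, djk⟩ := (pvMemAdjOf L j k).mp hkj
    rcases Nat.lt_trichotomy k i with h1 | h1 | h1
    · exact ⟨k, i, j, h1, hij, hjn, pvDis_symm dik, pvDis_symm djk, dij⟩
    · exact absurd h1.symm (by omega)
    · rcases Nat.lt_trichotomy k j with h2 | h2 | h2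
      · exact ⟨i, k, j, h1, h2, hjn, dik, dij, pvDis_symm djk⟩
      · exact absurd h2.symm (by omega)
      · exact ⟨i, j, k, hij, h2, hkn, dij, dik, djk⟩
  · rintro ⟨i, j, k, hij, hjk, hkn, dij, dik, djk⟩
    rw [List.any_eq_true]
    refine ⟨i, by rw [List.mem_range]; omega, ?_⟩
    unfold pvTRI
    rw [List.any_eq_true]
    refine ⟨j, (pvMemAdjOf L i j).mpr ⟨by omega, by omega, dij⟩, ?_⟩
    rw [Bool.and_eq_true]
    refine ⟨decide_eq_true hij, ?_⟩
    rw [Bool.not_eq_true']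
    have hk : k ∈ PySem.Set.inter (pvAdjOf L i) (pvAdjOf L j) := by
      rw [PySem.Set.mem_inter]
      exact ⟨(pvMemAdjOf L i k).mpr ⟨hkn, by omega, dik⟩,
        (pvMemAdjOf L j k).mpr ⟨hkn, by omega, djk⟩⟩
    rcases hl : PySem.Set.inter (pvAdjOf L i) (pvAdjOf L j) with _ | ⟨y, ys⟩
    · rw [hl] at hk; cases hk
    · simp

theorem pvAnyEDGE_iff (L : List (List Int)) :
    (List.range L.length).any (pvEDGE L) = true ↔
      ∃ i j, i < j ∧ j < L.length ∧ pvDis L i j := by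
  constructor
  · intro h
    rw [List.any_eq_true] at h
    obtain ⟨i, hi, hne⟩ := h
    rw [List.mem_range] at hi
    unfold pvEDGE at hne
    rw [Bool.not_eq_true'] at hne
    rcases hl : pvAdjOf L i with _ | ⟨j, js⟩
    · rw [hl] at hne; cases hne
    · have hj : j ∈ pvAdjOf L i := by rw [hl]; simp
      obtain ⟨hjn, hji, dij⟩ := (pvMemAdjOf L i j).mp hj
      rcases Nat.lt_trichotomy i j with h1 | h1 | h1
      · exact ⟨i, j, h1, hjn, dij⟩
      · exact absurd h1.symm hji
      · exact ⟨j, i, h1, hi, pvDis_symm dij⟩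
  · rintro ⟨i, j, hij, hjn, dij⟩
    rw [List.any_eq_true]
    refine ⟨i, by rw [List.mem_range]; omega, ?_⟩
    unfold pvEDGE
    have hj : j ∈ pvAdjOf L i := (pvMemAdjOf L i j).mpr ⟨hjn, by omega, dij⟩
    rcases hl : pvAdjOf L i with _ | ⟨y, ys⟩
    · rw [hl] at hj; cases hj
    · simp

theorem pvBoolEq {a b : Bool} (h : a = true ↔ b = true) : a = b := by
  cases a <;> cases b <;> simp_all

-- ===== VERDICT (by name: the statement is the Claim_ definition above) =====
theorem max_independent_set_3cycles_spec : Claim_equal_max_independent_set_3cycles := by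
  intro L _
  unfold Spec_max_independent_set_3cycles
  unfold max_independent_set_3cycles max_independent_set_3cycles_alt
  by_cases h0 : L.length = 0
  · simp [h0]
  · rw [if_neg h0, if_neg h0, pvLoopA_eq, pvScanB_eq, Bool.false_or]
    have ht : (List.range L.length).any (pvGA L) =
        (List.range L.length).any (pvTRI L) :=
      pvBoolEq (by rw [pvAnyTri_iff, pvAnyTRI_iff])
    have hp : (List.range L.length).any (pvPA L) =
        (List.range L.length).any (pvEDGE L) :=
      pvBoolEq (by rw [pvAnyPair_iff, pvAnyEDGE_iff])
    rw [ht, hp]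
    split_ifs <;> norm_num
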